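-- pv_equiv track=rewrite | github.com/Lab-Overflow/kg-rag-system | scripts/smoke_call_and_baseline_diff.py | find_seed_entities
-- ===== SOURCE A (Python) =====
-- def find_seed_entities(query: str, alias_lookup: dict[str, str], max_seeds: int = 6) -> list[str]:
--     q = query.strip()
--     # long-first match to avoid short alias collisions
--     items = sorted(alias_lookup.items(), key=lambda x: len(x[0]), reverse=True)
--     found: list[str] = []
--     seen = set()
--     for alias, canonical in items:
--         if alias and alias in q and canonical not in seen:
--             found.append(canonical)
--             seen.add(canonical)
--             if len(found) >= max_seeds:
--                 break
--     return found
-- ===== SOURCE B (Python) =====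
-- def find_seed_entities(query: str, alias_lookup: dict[str, str], max_seeds: int = 6) -> list[str]:
--     q = query.strip()
--     # single pass: keep only matching aliases, bucketed by alias length
--     matching = [(alias, canonical) for alias, canonical in alias_lookup.items()
--                 if alias and alias in q]
--     buckets: dict[int, list[str]] = {}
--     for length, canonical in ((len(alias), canonical) for alias, canonical in matching):
--         buckets.setdefault(length, []).append(canonical)
--     # visit buckets longest-first (counting-style: only the distinct lengths are sorted)
--     found: list[str] = []
--     seen = set()
--     for length in sorted(buckets, reverse=True):
--         for canonical in buckets[length]:
--             if canonical not in seen: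
--                 found.append(canonical)
--                 seen.add(canonical)
--                 if len(found) >= max_seeds:
--                     return found
--     return found
-- ===== Notes on version B (the rewrite author's own statement) =====
-- stated objective: alternative
-- what changed: A sorts every dict item by alias length before one filtered scan; B first filters to the matching aliases in one pass, groups their canonicals into length buckets (dict), and visits buckets longest-first, sorting only the distinct alias lengths.
import Mathlib
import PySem

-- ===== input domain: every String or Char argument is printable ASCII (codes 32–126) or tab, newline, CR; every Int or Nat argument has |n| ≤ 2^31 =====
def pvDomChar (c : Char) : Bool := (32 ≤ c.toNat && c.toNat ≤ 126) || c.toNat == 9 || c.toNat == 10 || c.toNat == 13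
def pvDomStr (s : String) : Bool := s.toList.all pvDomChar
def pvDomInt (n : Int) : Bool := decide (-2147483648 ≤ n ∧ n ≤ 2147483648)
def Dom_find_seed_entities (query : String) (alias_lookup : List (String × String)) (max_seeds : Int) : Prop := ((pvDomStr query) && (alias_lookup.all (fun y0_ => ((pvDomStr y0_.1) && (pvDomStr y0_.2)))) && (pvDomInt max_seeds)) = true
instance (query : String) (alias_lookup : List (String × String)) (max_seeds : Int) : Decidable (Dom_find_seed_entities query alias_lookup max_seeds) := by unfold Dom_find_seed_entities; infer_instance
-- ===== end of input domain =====

-- B replaces A's full sort of all dict items by filter-first + length buckets (only the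
-- distinct alias lengths are sorted); objective: alternative (same exact return value).

-- ===== PORT A =====
-- the 'for alias, canonical in items' loop, with its early 'break' once max_seeds are found
def pvALoop (q : String) (m : Int) : List (String × String) → List String → PySem.Set String → List String
  | [], found, _ => found
  | (al, canonical) :: rest, found, seen =>
    if (!al.toList.isEmpty) && PySem.Str.isIn al q && !(PySem.Set.contains seen canonical) then
      let found' := found ++ [canonical]
      let seen' := PySem.Set.add seen canonical
      if m ≤ (found'.length : Int) then found' else pvALoop q m rest found' seen'
    else pvALoop q m rest found seen

def find_seed_entities (query : String) (alias_lookup : List (String × String)) (max_seeds : Int) : List String :=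
  let q := PySem.Str.strip query
  -- sorted(alias_lookup.items(), key=lambda x: len(x[0]), reverse=True)
  let items := PySem.List.sorted (PySem.Dict.ofList alias_lookup).items (fun x => x.1.toList.length) true
  pvALoop q max_seeds items [] PySem.Set.empty

-- ===== PORT B =====
-- inner 'for canonical in buckets[length]' loop; the Bool flags the early 'return found'
def pvBInner (m : Int) : List String → List String → PySem.Set String → (List String × PySem.Set String × Bool)
  | [], found, seen => (found, seen, false)
  | c :: rest, found, seen =>
    if !(PySem.Set.contains seen c) then
      let found' := found ++ [c]
      let seen' := PySem.Set.add seen c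
      if m ≤ (found'.length : Int) then (found', seen', true)
      else pvBInner m rest found' seen'
    else pvBInner m rest found seen

-- outer 'for length in sorted(buckets, reverse=True)' loop
def pvBOuter (m : Int) : List (List String) → List String → PySem.Set String → List String
  | [], found, _ => found
  | b :: rest, found, seen =>
    match pvBInner m b found seen with
    | (found', _, true) => found'
    | (found', seen', false) => pvBOuter m rest found' seen'

def find_seed_entities_alt (query : String) (alias_lookup : List (String × String)) (max_seeds : Int) : List String :=
  let q := PySem.Str.strip query
  let matching := (PySem.Dict.ofList alias_lookup).items.filter
      (fun p => (!p.1.toList.isEmpty) && PySem.Str.isIn p.1 q)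
  -- buckets.setdefault(length, []).append(canonical)  ==  d[length] = d.get(length, []) + [canonical]
  let buckets := (matching.map (fun p => (p.1.toList.length, p.2))).foldl
      (fun (d : PySem.Dict Nat (List String)) p => d.modify p.1 [] (· ++ [p.2])) PySem.Dict.empty
  let lengths := PySem.List.sorted buckets.keys (fun k => k) true
  pvBOuter max_seeds (lengths.map (fun L => buckets.getD L [])) [] PySem.Set.empty

-- ===== PRECONDITION & SPEC =====
def Spec_find_seed_entities (query : String) (alias_lookup : List (String × String)) (max_seeds : Int) (out : List String) : Prop := out = find_seed_entities_alt query alias_lookup max_seeds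
instance (query : String) (alias_lookup : List (String × String)) (max_seeds : Int) (out : List String) : Decidable (Spec_find_seed_entities query alias_lookup max_seeds out) := by unfold Spec_find_seed_entities; infer_instance

-- ===== CLAIM (what is proved, stated in full; the proofs are below) =====
def Claim_equal_find_seed_entities : Prop := ∀ (query : String) (alias_lookup : List (String × String)) (max_seeds : Int), Dom_find_seed_entities query alias_lookup max_seeds → Spec_find_seed_entities query alias_lookup max_seeds (find_seed_entities query alias_lookup max_seeds)

-- ===== LEMMAS AND PROOFS =====

theorem pvALoop_eq_inner (q : String) (m : Int) (xs : List (String × String))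
    (found : List String) (seen : PySem.Set String) :
    pvALoop q m xs found seen =
      (pvBInner m ((xs.filter (fun p => (!p.1.toList.isEmpty) && PySem.Str.isIn p.1 q)).map (·.2))
        found seen).1 := by
  induction xs generalizing found seen with
  | nil => rfl
  | cons p rest ih =>
    obtain ⟨al, c⟩ := p
    by_cases hok : ((!al.toList.isEmpty) && PySem.Str.isIn al q) = true
    · simp only [pvALoop, List.filter_cons, hok, Bool.true_and, if_true, List.map_cons, pvBInner]
      by_cases hc : PySem.Set.contains seen c = true
      · simp only [hc, Bool.not_true, Bool.false_eq_true, if_false, ih]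
      · have hc' : PySem.Set.contains seen c = false := by simpa using hc
        simp only [hc', Bool.not_false, if_true]
        split
        · rfl
        · exact ih _ _
    · have hok' : ((!al.toList.isEmpty) && PySem.Str.isIn al q) = false := by simpa using hok
      simp only [pvALoop, List.filter_cons, hok', Bool.false_and, Bool.false_eq_true, if_false]
      exact ih _ _

theorem pvBInner_append (m : Int) (xs ys : List String) (found : List String) (seen : PySem.Set String) :
    pvBInner m (xs ++ ys) found seen =
      (match pvBInner m xs found seen with
       | (f, s, true) => (f, s, true)
       | (f, s, false) => pvBInner m ys f s) := by
  induction xs generalizing found seen with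
  | nil => rfl
  | cons c rest ih =>
    simp only [List.cons_append, pvBInner]
    split
    · split
      · rfl
      · exact ih _ _
    · exact ih _ _

theorem pvBOuter_eq_inner (m : Int) (bs : List (List String)) (found : List String) (seen : PySem.Set String) :
    pvBOuter m bs found seen = (pvBInner m bs.flatten found seen).1 := by
  induction bs generalizing found seen with
  | nil => rfl
  | cons b rest ih =>
    simp only [List.flatten_cons, pvBOuter, pvBInner_append]
    rcases h : pvBInner m b found seen with ⟨f, s, flag⟩
    cases flag <;> simp [ih]

theorem insertBy_pass {α : Type} (bef : α → α → Bool) (x : α) (l t : List α)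
    (h : ∀ y ∈ l, bef x y = false) :
    PySem.List.insertBy bef x (l ++ t) = l ++ PySem.List.insertBy bef x t := by
  induction l with
  | nil => rfl
  | cons y ys ih =>
    simp only [List.cons_append, PySem.List.insertBy, h y (by simp), Bool.false_eq_true, if_false,
      List.cons.injEq, true_and]
    exact ih (fun z hz => h z (by simp [hz]))

theorem insertBy_cons_of_bef {α : Type} (bef : α → α → Bool) (x y : α) (l : List α)
    (h : bef x y = true) :
    PySem.List.insertBy bef x (y :: l) = x :: y :: l := by
  simp [PySem.List.insertBy, h]

-- insert before every element
theorem insertBy_front {α : Type} (bef : α → α → Bool) (x : α) (l : List α)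
    (h : ∀ y ∈ l, bef x y = true) :
    PySem.List.insertBy bef x l = x :: l := by
  cases l with
  | nil => rfl
  | cons y ys => exact insertBy_cons_of_bef _ _ _ _ (h y (by simp))

theorem insertBy_flatMap_mem {α : Type} (key : α → Nat) (ks : List Nat) (B : Nat → List α) (x : α)
    (hks : ks.Pairwise (· > ·)) (hB : ∀ k ∈ ks, ∀ y ∈ B k, key y = k) (hmem : key x ∈ ks) :
    PySem.List.insertBy (fun a b => decide (key b < key a)) x (ks.flatMap B) =
      ks.flatMap (fun k => if key x = k then B k ++ [x] else B k) := by
  induction ks with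
  | nil => simp at hmem
  | cons k0 rest ih =>
    rw [List.pairwise_cons] at hks
    simp only [List.flatMap_cons]
    by_cases hk : key x = k0
    · -- x joins the head group: pass over B k0, then x goes in front of everything after
      subst hk
      rw [insertBy_pass _ _ _ _ (fun y hy => by
        have := hB (key x) (by simp) y hy; simp [this])]
      have hfront : ∀ y ∈ rest.flatMap B, (fun a b => decide (key b < key a)) x y = true := by
        intro y hy
        rw [List.mem_flatMap] at hy
        obtain ⟨k, hkmem, hyk⟩ := hy
        have := hB k (by simp [hkmem]) y hyk
        have h2 := hks.1 k hkmem
        simp [this]; omega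
      rw [insertBy_front _ _ _ hfront]
      have hrest : rest.flatMap (fun k => if key x = k then B k ++ [x] else B k) = rest.flatMap B := by
        apply List.flatMap_congr
        intro k hkmem
        have : key x ≠ k := by have := hks.1 k hkmem; omega
        simp [this]
      simp [hrest]
    · have hmem' : key x ∈ rest := by simpa [hk] using hmem
      rw [insertBy_pass _ _ _ _ (fun y hy => by
        have hy' := hB k0 (by simp) y hy
        have : key x < k0 := hks.1 _ hmem'
        simp [hy']; omega)]
      rw [ih hks.2 (fun k hk2 => hB k (by simp [hk2])) hmem']
      simp [hk]

theorem insertBy_flatMap_not_mem {α : Type} (key : α → Nat) (ks : List Nat) (B : Nat → List α) (x : α)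
    (hks : ks.Pairwise (· > ·)) (hB : ∀ k ∈ ks, ∀ y ∈ B k, key y = k) (hmem : key x ∉ ks) :
    PySem.List.insertBy (fun a b => decide (key b < key a)) x (ks.flatMap B) =
      (PySem.List.insertBy (fun a b => decide (b < a)) (key x) ks).flatMap
        (fun k => if key x = k then [x] else B k) := by
  induction ks with
  | nil => simp [PySem.List.insertBy]
  | cons k0 rest ih =>
    rw [List.pairwise_cons] at hks
    have hk0 : key x ≠ k0 := fun h => hmem (by simp [h])
    by_cases hlt : k0 < key x
    · -- new key goes first: x goes in front of every element
      have hfront : ∀ y ∈ (k0 :: rest).flatMap B, (fun a b => decide (key b < key a)) x y = true := by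
        intro y hy
        rw [List.mem_flatMap] at hy
        obtain ⟨k, hkmem, hyk⟩ := hy
        have hyk' := hB k hkmem y hyk
        rcases List.mem_cons.mp hkmem with h | h
        · simp [hyk', h]; omega
        · have := hks.1 k h; simp [hyk']; omega
      rw [insertBy_front _ _ _ hfront]
      rw [insertBy_cons_of_bef _ _ _ _ (by simp [hlt])]
      have hrest : (k0 :: rest).flatMap (fun k => if key x = k then [x] else B k) = (k0 :: rest).flatMap B := by
        apply List.flatMap_congr
        intro k hkmem
        have : key x ≠ k := fun h => hmem (h ▸ hkmem)
        simp [this]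
      simp [hrest]
    · have hgt : key x < k0 := by omega
      have hmem' : key x ∉ rest := fun h => hmem (by simp [h])
      simp only [List.flatMap_cons]
      rw [insertBy_pass _ _ _ _ (fun y hy => by
        have := hB k0 (by simp) y hy; simp [this]; omega)]
      rw [ih hks.2 (fun k hk2 => hB k (by simp [hk2])) hmem']
      have : PySem.List.insertBy (fun a b => decide (b < a)) (key x) (k0 :: rest) =
          k0 :: PySem.List.insertBy (fun a b => decide (b < a)) (key x) rest := by
        simp [PySem.List.insertBy]; omega
      rw [this]
      simp [hk0]

theorem sorted_keys_pairwise_gt (s : PySem.Set Nat) (hnd : s.Nodup) :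
    (PySem.List.sorted s (fun k => k) true).Pairwise (· > ·) := by
  have h1 := PySem.List.sorted_pairwise_rev (κ := Nat) s (fun k => k)
  have h2 : (PySem.List.sorted s (fun k => k) true).Nodup :=
    (PySem.List.sorted_perm s (fun k => k) true).nodup_iff.mpr hnd
  have h2' : (PySem.List.sorted s (fun k => k) true).Pairwise (· ≠ ·) := h2
  exact (h1.and h2').imp (fun h => by omega)

theorem eq_of_pairwise_gt_of_mem_iff (ks ks' : List Nat)
    (h : ks.Pairwise (· > ·)) (h' : ks'.Pairwise (· > ·)) (hm : ∀ k, k ∈ ks ↔ k ∈ ks') :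
    ks = ks' := by
  have hnd : ks.Nodup := h.imp (fun hlt => by omega) |>.nodup  -- Pairwise ≠ is Nodup
  have hnd' : ks'.Nodup := h'.imp (fun hlt => by omega) |>.nodup
  have hperm : ks.Perm ks' := (List.perm_ext_iff_of_nodup hnd hnd').mpr hm
  calc ks = PySem.List.sorted ks (fun k => k) true :=
        (PySem.List.sorted_rev_eq_self_of_pairwise ks _ (h.imp (fun hlt => by omega))).symm
    _ = ks' := PySem.List.sorted_rev_eq_of_perm_of_pairwise_gt ks ks' _ hperm.symm h'

theorem flatMap_filter_ne_nil {α : Type} (ks : List Nat) (B : Nat → List α) :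
    ks.flatMap B = (ks.filter (fun k => !(B k).isEmpty)).flatMap B := by
  induction ks with
  | nil => rfl
  | cons k rest ih =>
    by_cases hk : (B k).isEmpty = true
    · have hBk : B k = [] := List.isEmpty_iff.mp hk
      simp [hBk, ih]
    · have hk' : (B k).isEmpty = false := by simpa using hk
      simp [hk', ih]

theorem sorted_rev_eq_flatMap {α : Type} (key : α → Nat) (xs : List α) :
    PySem.List.sorted xs key true =
      (PySem.List.sorted (PySem.Set.ofList (xs.map key)) (fun k => k) true).flatMap
        (fun k => xs.filter (fun x => key x = k)) := by
  induction xs using List.reverseRecOn with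
  | nil => rfl
  | append_singleton xs x ih =>
    have hstep : PySem.List.sorted (xs ++ [x]) key true =
        PySem.List.insertBy (fun a b => decide (key b < key a)) x (PySem.List.sorted xs key true) := by
      rw [PySem.List.sorted_rev_eq_foldl_insertBy, PySem.List.sorted_rev_eq_foldl_insertBy,
        List.foldl_append]
      rfl
    set ks := PySem.List.sorted (PySem.Set.ofList (xs.map key)) (fun k => k) true with hksdef
    have hksgt : ks.Pairwise (· > ·) :=
      sorted_keys_pairwise_gt _ (PySem.Set.nodup_ofList _)
    have hkmemiff : ∀ k, k ∈ ks ↔ k ∈ xs.map key := by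
      intro k
      rw [hksdef, PySem.List.mem_sorted, PySem.Set.mem_ofList]
    have hB : ∀ k ∈ ks, ∀ y ∈ xs.filter (fun x => key x = k), key y = k := by
      intro k _ y hy
      simpa using (List.mem_filter.mp hy).2
    have hfilt : ∀ k, (xs ++ [x]).filter (fun z => key z = k) =
        xs.filter (fun z => key z = k) ++ if key x = k then [x] else [] := by
      intro k
      rw [List.filter_append]
      congr 1
      by_cases h : key x = k <;> simp [h]
    rw [hstep, ih]
    by_cases hmem : key x ∈ ks
    · -- key already present: the key set and its sorted order are unchanged
      have hmemset : key x ∈ PySem.Set.ofList (xs.map key) :=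
        (PySem.Set.mem_ofList _ _).mpr ((hkmemiff _).mp hmem)
      have hset : PySem.Set.ofList ((xs ++ [x]).map key) = PySem.Set.ofList (xs.map key) := by
        rw [List.map_append, List.map_singleton, PySem.Set.ofList_append_singleton,
          PySem.Set.add_of_mem hmemset]
      rw [insertBy_flatMap_mem key ks _ x hksgt hB hmem, hset, ← hksdef]
      apply List.flatMap_congr
      intro k hk
      rw [hfilt k]
      by_cases h : key x = k <;> simp [h]
    · -- new key: it is inserted into the sorted key list at its place
      have hxnot : key x ∉ xs.map key := fun h => hmem ((hkmemiff _).mpr h)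
      have hset : PySem.Set.ofList ((xs ++ [x]).map key) = PySem.Set.ofList (xs.map key) ++ [key x] := by
        rw [List.map_append, List.map_singleton, PySem.Set.ofList_append_singleton,
          PySem.Set.add_of_not_mem (fun h => hxnot ((PySem.Set.mem_ofList _ _).mp h))]
      have hsortstep : PySem.List.sorted (PySem.Set.ofList (xs.map key) ++ [key x]) (fun k => k) true =
          PySem.List.insertBy (fun a b => decide (b < a)) (key x) ks := by
        rw [PySem.List.sorted_rev_eq_foldl_insertBy, List.foldl_append, hksdef,
          PySem.List.sorted_rev_eq_foldl_insertBy]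
        rfl
      rw [insertBy_flatMap_not_mem key ks _ x hksgt hB hmem, hset, hsortstep]
      apply List.flatMap_congr
      intro k hk
      rw [hfilt k]
      by_cases h : key x = k
      · subst h
        have hxe : xs.filter (fun z => key z = key x) = [] := by
          rw [List.filter_eq_nil_iff]
          intro z hz hc
          exact hxnot (by simpa using ⟨z, hz, by simpa using hc⟩)
        simp [hxe]
      · simp [h]

theorem core (q : String) (xs : List (String × String)) (m : Int) :
    pvALoop q m (PySem.List.sorted xs (fun x => x.1.toList.length) true) [] PySem.Set.empty =
      (let matching := xs.filter (fun p => (!p.1.toList.isEmpty) && PySem.Str.isIn p.1 q)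
       let buckets := (matching.map (fun p => (p.1.toList.length, p.2))).foldl
          (fun (d : PySem.Dict Nat (List String)) p => d.modify p.1 [] (· ++ [p.2])) PySem.Dict.empty
       let lengths := PySem.List.sorted buckets.keys (fun k => k) true
       pvBOuter m (lengths.map (fun L => buckets.getD L [])) [] PySem.Set.empty) := by
  simp only []
  set key : String × String → Nat := fun p => p.1.toList.length with hkey
  set ok : String × String → Bool := fun p => (!p.1.toList.isEmpty) && PySem.Str.isIn p.1 q with hok
  set matching := xs.filter ok with hmatching
  set Bk : Nat → List String := fun k => (matching.filter (fun p => key p == k)).map (·.2) with hBk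
  -- B side: the buckets dict
  have hbkeys : ((matching.map (fun p => (key p, p.2))).foldl
      (fun (d : PySem.Dict Nat (List String)) p => d.modify p.1 [] (· ++ [p.2])) PySem.Dict.empty).keys
      = PySem.Set.ofList (matching.map key) := by
    rw [PySem.Dict.keys_foldl_modify_key (key := Prod.fst)]
    simp only [List.map_map]
    rfl
  have hbget : ∀ L, ((matching.map (fun p => (key p, p.2))).foldl
      (fun (d : PySem.Dict Nat (List String)) p => d.modify p.1 [] (· ++ [p.2])) PySem.Dict.empty).getD L []
      = Bk L := by
    intro L
    rw [PySem.Dict.getD_foldl_modify_append, PySem.Dict.getD_empty, List.nil_append,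
      List.filter_map, hBk]
    rw [List.map_map]
    rfl
  rw [pvALoop_eq_inner, pvBOuter_eq_inner, ← List.flatMap_def]
  rw [sorted_rev_eq_flatMap key xs, List.filter_flatMap, List.map_flatMap]
  -- A's per-key blocks are exactly Bk
  have hAB : (fun k => ((xs.filter (fun x => key x = k)).filter ok).map (·.2)) = Bk := by
    funext k
    rw [List.filter_comm, hBk, hmatching]
    congr 1
  rw [hAB]
  have hB2 : (fun L => ((matching.map (fun p => (key p, p.2))).foldl
      (fun (d : PySem.Dict Nat (List String)) p => d.modify p.1 [] (· ++ [p.2])) PySem.Dict.empty).getD L []) = Bk := by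
    funext L; exact hbget L
  rw [hbkeys, hB2]
  -- the two key lists flatten equally: drop empty buckets, then they coincide
  have hKSA := sorted_keys_pairwise_gt (PySem.Set.ofList (xs.map key)) (PySem.Set.nodup_ofList _)
  have hKSB := sorted_keys_pairwise_gt (PySem.Set.ofList (matching.map key)) (PySem.Set.nodup_ofList _)
  have hkeylists : (PySem.List.sorted (PySem.Set.ofList (xs.map key)) (fun k => k) true).filter
        (fun k => !(Bk k).isEmpty)
      = (PySem.List.sorted (PySem.Set.ofList (matching.map key)) (fun k => k) true).filter
        (fun k => !(Bk k).isEmpty) := by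
    apply eq_of_pairwise_gt_of_mem_iff
    · exact List.Pairwise.sublist List.filter_sublist hKSA
    · exact List.Pairwise.sublist List.filter_sublist hKSB
    · intro k
      simp only [List.mem_filter, PySem.List.mem_sorted, PySem.Set.mem_ofList]
      constructor
      · rintro ⟨-, hne⟩
        refine ⟨?_, hne⟩
        -- nonempty bucket means some matching element has this key
        have : Bk k ≠ [] := by simpa using hne
        rw [hBk] at this
        rcases List.exists_mem_of_ne_nil _ this with ⟨c, hc⟩
        rw [List.mem_map] at hc
        obtain ⟨p, hp, -⟩ := hc
        rw [List.mem_filter] at hp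
        exact List.mem_map.mpr ⟨p, hp.1, by simpa using hp.2⟩
      · rintro ⟨hmem, hne⟩
        refine ⟨?_, hne⟩
        rw [List.mem_map] at hmem ⊢
        obtain ⟨p, hp, hkp⟩ := hmem
        exact ⟨p, List.mem_of_mem_filter hp, hkp⟩
  rw [flatMap_filter_ne_nil _ Bk, hkeylists, ← flatMap_filter_ne_nil _ Bk]

-- ===== VERDICT (by name: the statement is the Claim_ definition above) =====
theorem find_seed_entities_spec : Claim_equal_find_seed_entities := by
  intro query alias_lookup max_seeds _
  unfold Spec_find_seed_entities find_seed_entities find_seed_entities_alt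
  exact core (PySem.Str.strip query) (PySem.Dict.ofList alias_lookup).items max_seeds
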